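-- pv_equiv track=rewrite | github.com/Nexmurco/advent-of-code | 2023/18/mega_magma_trenches.py | split_intervals
-- ===== SOURCE A (Python) =====
-- def split_intervals(inte, vals):
--     intervals = []
--     pos_initial = None
--     pos_final = None
--     prev_pos = None
--     cur_pos = None
--     for pos in vals:
--         if pos > inte[0] and pos < inte[1]:
--             prev_pos = cur_pos
--             cur_pos = pos
--             if prev_pos is None:
--                 pos_initial = cur_pos
--             else:
--                 intervals.append((cur_pos, prev_pos))
--                 intervals.append((prev_pos, cur_pos))
--
--         elif pos >= inte[1]:
--             pos_final = cur_pos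
--             break
--
--     if pos_initial is not None:
--         intervals.append((inte[0], pos_initial))
--         intervals.append((pos_initial, inte[0]))
--
--     if pos_final is not None:
--         intervals.append((pos_final, inte[1]))
--         intervals.append((inte[1], pos_final))
--
--     if len(intervals) == 0:
--         intervals.append((inte[0], inte[1]))
--         intervals.append((inte[1], inte[0]))
--     pass
--     return intervals
-- ===== SOURCE B (Python) =====
-- def split_intervals(inte, vals):
--     # First pass: collect the interior points (in order) and whether a value >= inte[1] stopped the scan.
--     points = []
--     saw_end = False
--     for pos in vals:
--         if inte[0] < pos < inte[1]:
--             points.append(pos)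
--         elif pos >= inte[1]:
--             saw_end = True
--             break
--     # Second phase: build the directed segment pairs from the collected points.
--     intervals = []
--     for a, b in zip(points, points[1:]):
--         intervals.append((b, a))
--         intervals.append((a, b))
--     if points:
--         intervals.append((inte[0], points[0]))
--         intervals.append((points[0], inte[0]))
--     if saw_end and points:
--         intervals.append((points[-1], inte[1]))
--         intervals.append((inte[1], points[-1]))
--     if not intervals:
--         intervals.append((inte[0], inte[1]))
--         intervals.append((inte[1], inte[0]))
--     return intervals
-- ===== Notes on version B (the rewrite author's own statement) =====
-- stated objective: simpler
-- what changed: B splits A's single stateful loop (prev/cur/pos_initial/pos_final sentinels threaded through one pass) into two plain phases: first collect the interior points and a saw_end flag, then build all pairs from the points list by zipping consecutive points and reading points[0]/points[-1].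
import Mathlib
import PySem

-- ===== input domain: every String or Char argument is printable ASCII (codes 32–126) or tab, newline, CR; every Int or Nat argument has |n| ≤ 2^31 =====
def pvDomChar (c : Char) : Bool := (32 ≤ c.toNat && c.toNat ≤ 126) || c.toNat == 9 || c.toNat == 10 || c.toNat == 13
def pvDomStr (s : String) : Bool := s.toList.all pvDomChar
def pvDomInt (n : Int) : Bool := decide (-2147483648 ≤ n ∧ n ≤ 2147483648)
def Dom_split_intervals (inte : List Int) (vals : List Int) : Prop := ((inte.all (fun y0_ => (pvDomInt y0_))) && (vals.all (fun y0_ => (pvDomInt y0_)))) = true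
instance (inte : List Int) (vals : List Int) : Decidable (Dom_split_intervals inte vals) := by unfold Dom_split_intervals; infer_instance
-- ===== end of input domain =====

-- B replaces A's one stateful loop (prev/cur/pos_initial/pos_final sentinels) with two plain
-- phases: collect interior points + saw_end flag, then build the pairs from that list (simpler).

-- ===== PORT A =====
-- A's loop: state = (pos_initial?, pos_final is set only at the break, cur_pos?, intervals);
-- returns (intervals, pos_initial, pos_final).  prev_pos is the previous cur_pos.
def splitLoopA (i0 i1 : Int) : List Int → Option Int → Option Int → Option Int →
    List (Int × Int) → (List (Int × Int) × Option Int × Option Int)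
  | [], posInit, posFinal, _cur, acc => (acc, posInit, posFinal)
  | pos :: rest, posInit, posFinal, cur, acc =>
    if pos > i0 ∧ pos < i1 then
      match cur with
      | none => splitLoopA i0 i1 rest (some pos) posFinal (some pos) acc
      | some prev => splitLoopA i0 i1 rest posInit posFinal (some pos)
          (acc ++ [(pos, prev), (prev, pos)])
    else if pos ≥ i1 then
      (acc, posInit, cur)      -- break, pos_final = cur_pos
    else
      splitLoopA i0 i1 rest posInit posFinal cur acc

-- inte[0]/inte[1] raise IndexError when inte has < 2 elements (excluded by Pre_); getD's
-- default is never reached inside Pre_.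
def split_intervals (inte : List Int) (vals : List Int) : List (Int × Int) :=
  let i0 := inte.getD 0 0
  let i1 := inte.getD 1 0
  let r := splitLoopA i0 i1 vals none none none []
  let acc1 := match r.2.1 with
    | some p => r.1 ++ [(i0, p), (p, i0)]
    | none => r.1
  let acc2 := match r.2.2 with
    | some p => acc1 ++ [(p, i1), (i1, p)]
    | none => acc1
  if acc2.length = 0 then acc2 ++ [(i0, i1), (i1, i0)] else acc2

-- ===== PORT B =====
-- B's first pass: the interior points in order, and whether a value ≥ inte[1] stopped the scan.
def altCollect (i0 i1 : Int) : List Int → (List Int × Bool)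
  | [] => ([], false)
  | pos :: rest =>
    if i0 < pos ∧ pos < i1 then
      let r := altCollect i0 i1 rest
      (pos :: r.1, r.2)
    else if pos ≥ i1 then ([], true)
    else altCollect i0 i1 rest

def split_intervals_alt (inte : List Int) (vals : List Int) : List (Int × Int) :=
  let i0 := inte.getD 0 0
  let i1 := inte.getD 1 0
  let c := altCollect i0 i1 vals
  let points := c.1
  let intervals := (points.zip points.tail).flatMap (fun ab => [(ab.2, ab.1), (ab.1, ab.2)])
  let intervals := match points.head? with
    | some p => intervals ++ [(i0, p), (p, i0)]
    | none => intervals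
  let intervals :=
    if c.2 then
      match points.getLast? with
      | some p => intervals ++ [(p, i1), (i1, p)]
      | none => intervals
    else intervals
  if intervals.isEmpty then intervals ++ [(i0, i1), (i1, i0)] else intervals

-- ===== PRECONDITION & SPEC =====
-- A reads inte[0] and inte[1] (in the loop or in the final fallback) on every path, so it
-- raises IndexError exactly when inte has fewer than 2 elements; Pre_ excludes only that.
def Pre_split_intervals (inte : List Int) (vals : List Int) : Prop := 2 ≤ inte.length
instance (inte : List Int) (vals : List Int) : Decidable (Pre_split_intervals inte vals) := by
  unfold Pre_split_intervals; infer_instance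
def pvWitness_split_intervals : List Int × List Int := ([0, 10], [3, 7, 12])

def Spec_split_intervals (inte : List Int) (vals : List Int) (out : List (Int × Int)) : Prop := out = split_intervals_alt inte vals
instance (inte : List Int) (vals : List Int) (out : List (Int × Int)) : Decidable (Spec_split_intervals inte vals out) := by unfold Spec_split_intervals; infer_instance

-- ===== CLAIM (what is proved, stated in full; the proofs are below) =====
def Claim_equal_split_intervals : Prop := ∀ (inte : List Int) (vals : List Int), Dom_split_intervals inte vals → Pre_split_intervals inte vals → Spec_split_intervals inte vals (split_intervals inte vals)

-- ===== LEMMAS AND PROOFS =====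

-- the pairs B emits from its points list
def chainPairs' (ps : List Int) : List (Int × Int) :=
  (ps.zip ps.tail).flatMap (fun ab => [(ab.2, ab.1), (ab.1, ab.2)])

-- the pairs B emits for a chain of interior points c :: ps
def chainPairs (c : Int) (ps : List Int) : List (Int × Int) :=
  ((c :: ps).zip ps).flatMap (fun ab => [(ab.2, ab.1), (ab.1, ab.2)])

lemma chainPairs_cons (c p : Int) (ps : List Int) :
    chainPairs c (p :: ps) = [(p, c), (c, p)] ++ chainPairs p ps := by
  simp [chainPairs, List.zip]

lemma lastD_cons (p : Int) (ps : List Int) (c : Int) :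
    (p :: ps).getLast?.getD c = ps.getLast?.getD p := by
  induction ps generalizing p c with
  | nil => rfl
  | cons q qs ih => rw [List.getLast?_cons_cons, ih q c, ih q p]

lemma getLast?_cons_eq (p : Int) (ps : List Int) :
    (p :: ps).getLast? = some (ps.getLast?.getD p) := by
  induction ps generalizing p with
  | nil => rfl
  | cons q qs ih => rw [List.getLast?_cons_cons, ih q]; simp

-- A's loop, once an interior point c has been seen
lemma splitLoopA_some (i0 i1 : Int) (vals : List Int) :
    ∀ (pi pf : Option Int) (c : Int) (acc : List (Int × Int)),
    splitLoopA i0 i1 vals pi pf (some c) acc =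
      (acc ++ chainPairs c (altCollect i0 i1 vals).1, pi,
       if (altCollect i0 i1 vals).2 then some ((altCollect i0 i1 vals).1.getLast?.getD c) else pf) := by
  induction vals with
  | nil => intro pi pf c acc; simp [splitLoopA, altCollect, chainPairs]
  | cons pos rest ih =>
    intro pi pf c acc
    by_cases h1 : pos > i0 ∧ pos < i1
    · have h1' : i0 < pos ∧ pos < i1 := ⟨h1.1, h1.2⟩
      simp only [splitLoopA, altCollect, if_pos h1, ih]
      simp [chainPairs_cons, lastD_cons]
    · have h1' : ¬ (i0 < pos ∧ pos < i1) := fun h => h1 ⟨h.1, h.2⟩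
      by_cases h2 : pos ≥ i1
      · simp [splitLoopA, altCollect, if_neg h1, if_pos h2, chainPairs]
      · simp only [splitLoopA, altCollect, if_neg h1, if_neg h2, ih]

-- A's loop from the initial state, against B's first pass
lemma splitLoopA_none (i0 i1 : Int) (vals : List Int) :
    splitLoopA i0 i1 vals none none none [] =
      (chainPairs' (altCollect i0 i1 vals).1, (altCollect i0 i1 vals).1.head?,
       if (altCollect i0 i1 vals).2 then (altCollect i0 i1 vals).1.getLast? else none) := by
  induction vals with
  | nil => simp [splitLoopA, altCollect, chainPairs']
  | cons pos rest ih =>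
    by_cases h1 : pos > i0 ∧ pos < i1
    · have h1' : i0 < pos ∧ pos < i1 := ⟨h1.1, h1.2⟩
      simp only [splitLoopA, altCollect, if_pos h1, splitLoopA_some]
      simp [chainPairs', chainPairs, getLast?_cons_eq]
    · have h1' : ¬ (i0 < pos ∧ pos < i1) := fun h => h1 ⟨h.1, h.2⟩
      by_cases h2 : pos ≥ i1
      · simp [splitLoopA, altCollect, if_neg h1, if_pos h2, chainPairs']
      · simp only [splitLoopA, altCollect, if_neg h1, if_neg h2, ih]

-- ===== VERDICT (by name: the statement is the Claim_ definition above) =====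
theorem split_intervals_spec : Claim_equal_split_intervals := by
  intro inte vals _hdom _hpre
  unfold Spec_split_intervals split_intervals split_intervals_alt
  simp only [splitLoopA_none]
  rcases hpts : (altCollect (inte.getD 0 0) (inte.getD 1 0) vals).1 with _ | ⟨p, ps⟩
  · rcases hse : (altCollect (inte.getD 0 0) (inte.getD 1 0) vals).2 <;>
      simp [chainPairs']
  · rcases hse : (altCollect (inte.getD 0 0) (inte.getD 1 0) vals).2 <;>
      simp [chainPairs', getLast?_cons_eq]
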